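-- pv_equiv track=rewrite | github.com/kophy/Codewars | Python/Length of missing array.py | get_length_of_missing_array
-- ===== SOURCE A (Python) =====
-- def get_length_of_missing_array(array_of_arrays):
--     if len(array_of_arrays) <= 1 or None in array_of_arrays:
--         return 0;
--     data = sorted([len(array) for array in array_of_arrays]);
--     if data[0] == 0:
--         return 0;
--     full = sum([i for i in range(data[0], data[-1] + 1)]);
--     if data[-1] - data[0] != len(data):
--         return 0;
--     else:
--         return full - sum(data);
-- ===== SOURCE B (Python) =====
-- def get_length_of_missing_array(array_of_arrays):
--     if len(array_of_arrays) <= 1 or None in array_of_arrays: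
--         return 0
--     lo = hi = None
--     total = n = 0
--     for arr in array_of_arrays:
--         m = len(arr)
--         if lo is None or m < lo:
--             lo = m
--         if hi is None or m > hi:
--             hi = m
--         total += m
--         n += 1
--     if lo == 0 or hi - lo != n:
--         return 0
--     return (lo + hi) * (hi - lo + 1) // 2 - total
-- ===== Notes on version B (the rewrite author's own statement) =====
-- stated objective: alternative
-- what changed: A sorts the length list, indexes it, and materialises and sums an explicit range(lo, hi+1) list; B makes one pass over the input tracking min/max/sum/count and uses the arithmetic-series closed form (lo+hi)*(hi-lo+1)//2, so there is no sort and no range-sized list.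
import Mathlib
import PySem

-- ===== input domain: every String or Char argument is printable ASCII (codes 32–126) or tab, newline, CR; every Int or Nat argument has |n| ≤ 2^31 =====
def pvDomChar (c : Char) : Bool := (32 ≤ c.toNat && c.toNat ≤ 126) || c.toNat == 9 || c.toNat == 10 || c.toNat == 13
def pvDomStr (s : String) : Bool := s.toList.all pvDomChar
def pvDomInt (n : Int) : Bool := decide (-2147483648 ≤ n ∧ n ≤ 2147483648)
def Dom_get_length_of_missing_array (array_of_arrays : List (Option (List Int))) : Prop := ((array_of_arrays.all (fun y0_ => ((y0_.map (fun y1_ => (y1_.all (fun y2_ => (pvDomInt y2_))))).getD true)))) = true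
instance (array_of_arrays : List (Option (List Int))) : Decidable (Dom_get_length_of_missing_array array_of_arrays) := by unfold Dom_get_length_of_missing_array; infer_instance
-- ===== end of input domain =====

-- B replaces A's sort + explicit summed range by a single min/max/sum/count pass and the
-- arithmetic-series closed form (objective: alternative; no sort, no materialised range).

-- ===== PORT A =====
-- len(array): the guard has excluded None, so Option.getD [] is never the none branch.
-- data[0] / data[-1]: data is nonempty (len(array_of_arrays) ≥ 2), so headD/getLastD are exact.
def get_length_of_missing_array (array_of_arrays : List (Option (List Int))) : Int :=
  if array_of_arrays.length ≤ 1 || array_of_arrays.contains none then 0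
  else
    let data := PySem.List.sorted (array_of_arrays.map (fun a => ((a.getD []).length : Int))) (fun x => x) false
    if data.headD 0 == 0 then 0
    else
      let full := (PySem.List.pyRange (data.headD 0) (data.getLastD 0 + 1) 1).sum
      if data.getLastD 0 - data.headD 0 != (data.length : Int) then 0
      else full - data.sum

-- ===== PORT B =====
-- one update of B's loop state (lo, hi, total, n) with the current length m
def pvStep (st : Option Int × Option Int × Int × Int) (m : Int) :
    Option Int × Option Int × Int × Int :=
  let lo := match st.1 with | none => some m | some l => if m < l then some m else some l
  let hi := match st.2.1 with | none => some m | some h => if m > h then some m else some h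
  (lo, hi, st.2.2.1 + m, st.2.2.2 + 1)

-- the loop body: m = len(arr); None was excluded by the guard, so getD [] is exact
def pvStepB (st : Option Int × Option Int × Int × Int) (arr : Option (List Int)) :
    Option Int × Option Int × Int × Int :=
  pvStep st ((arr.getD []).length : Int)

-- the code after the loop: the lo == 0 / hi - lo != n guards and the closed form
def pvFinish : Option Int × Option Int × Int × Int → Int
  | (some lo, some hi, total, n) =>
      if lo == 0 || hi - lo != n then 0
      else PySem.Int.floordiv ((lo + hi) * (hi - lo + 1)) 2 - total
  | _ => 0  -- unreachable: the list is nonempty, so lo and hi are set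

def get_length_of_missing_array_alt (array_of_arrays : List (Option (List Int))) : Int :=
  if array_of_arrays.length ≤ 1 || array_of_arrays.contains none then 0
  else pvFinish (array_of_arrays.foldl pvStepB (none, none, 0, 0))

-- ===== PRECONDITION & SPEC =====
def Spec_get_length_of_missing_array (array_of_arrays : List (Option (List Int))) (out : Int) : Prop := out = get_length_of_missing_array_alt array_of_arrays
instance (array_of_arrays : List (Option (List Int))) (out : Int) : Decidable (Spec_get_length_of_missing_array array_of_arrays out) := by unfold Spec_get_length_of_missing_array; infer_instance

-- ===== CLAIM (what is proved, stated in full; the proofs are below) =====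
def Claim_equal_get_length_of_missing_array : Prop := ∀ (array_of_arrays : List (Option (List Int))), Dom_get_length_of_missing_array array_of_arrays → Spec_get_length_of_missing_array array_of_arrays (get_length_of_missing_array array_of_arrays)

-- ===== LEMMAS AND PROOFS =====

-- B's fold, once both optionals are set, tracks min/max/sum/length
theorem pvStep_some (a b t n m : Int) :
    pvStep (some a, some b, t, n) m = (some (min a m), some (max b m), t + m, n + 1) := by
  unfold pvStep
  simp only [min_def, max_def]
  split_ifs <;> simp_all <;> omega

theorem pvFold_spec (l : List Int) (a b t n : Int) :
    l.foldl pvStep (some a, some b, t, n)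
      = (some (l.foldl min a), some (l.foldl max b), t + l.sum, n + l.length) := by
  induction l generalizing a b t n with
  | nil => simp
  | cons m l ih =>
      rw [List.foldl_cons, pvStep_some, ih]
      simp only [List.sum_cons, List.length_cons, List.foldl_cons, Prod.mk.injEq]
      refine ⟨by trivial, by trivial, by ring, by push_cast; ring⟩

theorem foldl_min_mem (l : List Int) (a : Int) : l.foldl min a ∈ a :: l := by
  induction l generalizing a with
  | nil => simp
  | cons x l ih =>
      rw [List.foldl_cons]
      rcases List.mem_cons.mp (ih (min a x)) with h | h
      · rw [h]
        rcases min_cases a x with ⟨he, _⟩ | ⟨he, _⟩ <;> simp [he]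
      · simp [h]

theorem foldl_min_le (l : List Int) (a : Int) : ∀ x ∈ a :: l, l.foldl min a ≤ x := by
  induction l generalizing a with
  | nil => intro x hx; simp at hx; simp [hx]
  | cons y l ih =>
      intro x hx
      rw [List.foldl_cons]
      rcases List.mem_cons.mp hx with h | h
      · rw [h]
        exact le_trans (ih (min a y) (min a y) (by simp)) (min_le_left a y)
      · rcases List.mem_cons.mp h with h' | h'
        · rw [h']
          exact le_trans (ih (min a y) (min a y) (by simp)) (min_le_right a y)
        · exact ih (min a y) x (by simp [h'])

theorem foldl_max_mem (l : List Int) (a : Int) : l.foldl max a ∈ a :: l := by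
  induction l generalizing a with
  | nil => simp
  | cons x l ih =>
      rw [List.foldl_cons]
      rcases List.mem_cons.mp (ih (max a x)) with h | h
      · rw [h]
        rcases max_cases a x with ⟨he, _⟩ | ⟨he, _⟩ <;> simp [he]
      · simp [h]

theorem foldl_max_ge (l : List Int) (a : Int) : ∀ x ∈ a :: l, x ≤ l.foldl max a := by
  induction l generalizing a with
  | nil => intro x hx; simp at hx; simp [hx]
  | cons y l ih =>
      intro x hx
      rw [List.foldl_cons]
      rcases List.mem_cons.mp hx with h | h
      · rw [h]
        exact le_trans (le_max_left a y) (ih (max a y) (max a y) (by simp))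
      · rcases List.mem_cons.mp h with h' | h'
        · rw [h']
          exact le_trans (le_max_right a y) (ih (max a y) (max a y) (by simp))
        · exact ih (max a y) x (by simp [h'])

-- in a ≤-pairwise list every element is ≤ the last one
theorem pairwise_le_getLastD (l : List Int) (h : l.Pairwise (· ≤ ·)) :
    ∀ x ∈ l, x ≤ l.getLastD 0 := by
  induction l with
  | nil => simp
  | cons a l ih =>
      intro x hx
      rcases List.mem_cons.mp hx with h' | h'
      · subst h'
        cases l with
        | nil => simp
        | cons b l' =>
            have hab : x ≤ b := (List.pairwise_cons.mp h).1 b (by simp)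
            have := ih (List.pairwise_cons.mp h).2 b (by simp)
            simpa [List.getLastD_cons] using le_trans hab this
      · cases l with
        | nil => simp at h'
        | cons b l' =>
            have := ih (List.pairwise_cons.mp h).2 x h'
            simpa [List.getLastD_cons] using this

theorem getLastD_mem (l : List Int) (h : l ≠ []) : l.getLastD 0 ∈ l := by
  induction l with
  | nil => exact absurd rfl h
  | cons a l ih =>
      cases l with
      | nil => simp
      | cons b l' =>
          have hm := ih (by simp)
          simp only [List.getLastD_cons] at hm ⊢
          exact List.mem_cons_of_mem a hm

-- sum of range(lo, lo+n) doubled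
theorem pyRange_sum_double (n : Nat) (lo : Int) :
    2 * (PySem.List.pyRange lo (lo + n) 1).sum = (2 * lo + n - 1) * n := by
  induction n with
  | zero => simp [PySem.List.pyRange_one_eq_nil (le_refl lo)]
  | succ n ih =>
      have h : lo + (n + 1 : Nat) = (lo + n) + 1 := by push_cast; ring
      rw [h, PySem.List.pyRange_one_succ_right (by omega)]
      simp only [List.sum_append, List.sum_cons, List.sum_nil]
      push_cast
      push_cast at ih
      nlinarith [ih]

-- ===== VERDICT (by name: the statement is the Claim_ definition above) =====
theorem get_length_of_missing_array_spec : Claim_equal_get_length_of_missing_array := by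
  intro xs _
  unfold Spec_get_length_of_missing_array
  unfold get_length_of_missing_array get_length_of_missing_array_alt
  by_cases hp : xs.length ≤ 1 ∨ none ∈ xs
  · have hb : (decide (xs.length ≤ 1) || xs.contains none) = true := by
      rcases hp with h | h <;> simp [h]
    rw [if_pos hb, if_pos hb]
  · rw [not_or] at hp
    obtain ⟨hp1, hp2⟩ := hp
    have hp : 1 < xs.length ∧ none ∉ xs := ⟨by omega, hp2⟩
    have hb : ¬ ((decide (xs.length ≤ 1) || xs.contains none) = true) := by
      simp [hp.1, hp.2]
    rw [if_neg hb, if_neg hb]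
    set L : List Int := xs.map (fun a => ((a.getD []).length : Int)) with hL
    have hxs2 : 2 ≤ xs.length := by omega
    obtain ⟨h, t, hLt⟩ : ∃ h t, L = h :: t := by
      cases xs with
      | nil => simp at hxs2
      | cons a l => exact ⟨_, _, rfl⟩
    -- B's fold computes (min, max, sum, length) of the lengths
    have hB : xs.foldl pvStepB (none, none, 0, 0)
        = (some (t.foldl min h), some (t.foldl max h), h + t.sum, 1 + (t.length : Int)) := by
      have hmap : xs.foldl pvStepB (none, none, 0, 0) = L.foldl pvStep (none, none, 0, 0) := by
        rw [hL, List.foldl_map]; rfl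
      rw [hmap, hLt, List.foldl_cons]
      have hstep : pvStep (none, none, 0, 0) h = (some h, some h, h, 1) := by
        simp [pvStep]
      rw [hstep, pvFold_spec]
    set mn := t.foldl min h with hmn
    set mx := t.foldl max h with hmx
    -- A's sorted list: head is the min, last is the max, sum and length are invariant
    set data := PySem.List.sorted L (fun x => x) false with hdata
    have hperm : data.Perm L := PySem.List.sorted_perm L (fun x => x) false
    have hdne : data ≠ [] := by
      intro hnil
      have := hperm.length_eq
      rw [hnil, hLt] at this
      simp at this
    obtain ⟨d0, dt, hdc⟩ : ∃ d0 dt, data = d0 :: dt := by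
      cases hdl : data with
      | nil => exact absurd hdl hdne
      | cons a l => exact ⟨_, _, rfl⟩
    have hhead : data.headD 0 = mn := by
      rw [hdc]; simp only [List.headD_cons]
      have hmem : d0 ∈ L := hperm.mem_iff.mp (by rw [hdc]; simp)
      have hle : ∀ y ∈ L, d0 ≤ y := by
        have := PySem.List.key_head_sorted_le (xs := L) (key := fun x => x) (m := d0) (t := dt)
          (by rw [← hdc, hdata])
        simpa using this
      have h1 : d0 ≤ mn := hle mn (by rw [hLt]; exact foldl_min_mem t h)
      have h2 : mn ≤ d0 := foldl_min_le t h d0 (by rw [← hLt]; exact hmem)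
      omega
    have hlast : data.getLastD 0 = mx := by
      have hpw : data.Pairwise (· ≤ ·) := by
        have := PySem.List.sorted_pairwise (xs := L) (key := fun x => x)
        simpa [hdata] using this
      have hmem : data.getLastD 0 ∈ L := hperm.mem_iff.mp (getLastD_mem data hdne)
      have h1 : data.getLastD 0 ≤ mx := foldl_max_ge t h _ (by rw [← hLt]; exact hmem)
      have h2 : mx ≤ data.getLastD 0 := by
        apply pairwise_le_getLastD data hpw
        apply hperm.mem_iff.mpr
        rw [hLt]; exact foldl_max_mem t h
      omega
    have hsum : data.sum = h + t.sum := by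
      have := hperm.sum_eq
      rw [hLt] at this; simpa using this
    have hlen : (data.length : Int) = 1 + (t.length : Int) := by
      have := hperm.length_eq
      rw [hLt] at this; rw [this, List.length_cons]; push_cast; ring
    rw [hB]
    simp only [hhead, hlast, hsum, hlen, pvFinish]
    -- the guards coincide
    by_cases h0 : mn = 0
    · simp [h0]
    · by_cases hk : mx - mn = 1 + (t.length : Int)
      · simp only [h0, hk, beq_iff_eq, bne_self_eq_false, if_false, Bool.or_false,
          ]
        rw [show (1 + (t.length : Int) + 1) = mx - mn + 1 from by omega]
        -- the arithmetic-series closed form equals the summed range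
        have hlen2 : mn ≤ mx := by
          have h1 := foldl_min_le t h h (by simp)
          have h2 := foldl_max_ge t h h (by simp)
          omega
        have hnn : mx + 1 = mn + (((mx + 1 - mn).toNat : Int)) := by omega
        have hsum2 := pyRange_sum_double (mx + 1 - mn).toNat mn
        have hcast : ((mx + 1 - mn).toNat : Int) = mx + 1 - mn := by omega
        have hfd : PySem.Int.floordiv ((mn + mx) * (mx - mn + 1)) 2
            = (PySem.List.pyRange mn (mx + 1) 1).sum := by
          rw [PySem.Int.floordiv_eq_ediv_of_pos (by omega)]
          have he : (mn + mx) * (mx - mn + 1) = 2 * (PySem.List.pyRange mn (mx + 1) 1).sum := by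
            rw [hnn, hsum2, hcast]; ring
          rw [he]
          omega
        rw [hfd]
        simp
      · simp [hk]
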